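-- pv_equiv track=rewrite | github.com/NadinaMaia/IBM | Documents/Nari/faca/Algo_1/python/practica7.py | tiene_vocales
-- ===== SOURCE A (Python) =====
-- def pertenece(s:[int], e:int)-> bool:
--     for i in range(len(s)):
--         if s[i] == e:
--             pertenece= True
--             break
--         else:
--             pertenece= False
--     return pertenece
--
-- def tiene_repetidos(lista:[str])-> bool:
--     repeticiones = 0
--     for evaluar in lista:
--         for elemento in lista:
--             if evaluar == elemento:
--                 repeticiones += 1
--         if repeticiones > 1:
--             return True
--         else:
--             return False
--
-- def tiene_vocales(palabra: str)-> bool: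
--     vocales = ['a','e','i','o','u']
--     vocales_hay = []
--     for letra in palabra:
--         if pertenece(vocales, letra):
--             vocales_hay.append(letra)
--     if len(vocales_hay) >= 3 and tiene_repetidos(vocales_hay) == False:
--         return True
--     else:
--         return False
-- ===== SOURCE B (Python) =====
-- def tiene_vocales(palabra: str) -> bool:
--     vocales = [c for c in palabra if c in 'aeiou']
--     return len(vocales) >= 3 and len(set(vocales)) == len(vocales)
-- ===== Notes on version B (the rewrite author's own statement) =====
-- stated objective: simpler
-- what changed: B filters the vowels with one comprehension and checks that there are at least 3 vowels and that all of them are distinct via a set-size comparison, replacing A's per-character membership helper, list appends and the count-based tiene_repetidos helper. Dropping the per-character helper call and list appends makes B much faster by constant factor.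
-- intended difference: On words with at least 3 vowels whose first vowel occurs exactly once but some later vowel repeats (e.g. 'aeei'), A returns True because tiene_repetidos returns inside its first loop iteration and so only checks the first vowel for repetition, while B returns False, the intended answer that no vowel may repeat. — e.g. on tiene_vocales("aeei"): A returns true, B returns false
import Mathlib
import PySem

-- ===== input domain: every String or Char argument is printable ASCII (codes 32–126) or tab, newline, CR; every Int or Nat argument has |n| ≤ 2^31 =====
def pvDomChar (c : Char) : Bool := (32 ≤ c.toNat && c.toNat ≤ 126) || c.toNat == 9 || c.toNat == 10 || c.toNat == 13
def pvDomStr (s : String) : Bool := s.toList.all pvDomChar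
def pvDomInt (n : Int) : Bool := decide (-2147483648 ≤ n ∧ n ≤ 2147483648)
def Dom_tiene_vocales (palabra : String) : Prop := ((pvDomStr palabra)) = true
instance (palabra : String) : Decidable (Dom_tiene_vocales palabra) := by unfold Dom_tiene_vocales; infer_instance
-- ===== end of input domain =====

-- B filters the vowels once and checks at-least-3-vowels-all-distinct via a set-size comparison
-- (objective: simpler); A's buggy helper only ever tests the FIRST vowel for repetition, and B
-- intentionally fixes that (see D_ below).

-- ===== PORT A =====
-- Python's loop variable `pertenece` starts unbound; for the nonempty lists A ever passes
-- the first iteration assigns it, so an initial `false` accumulator is exact there.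
def perteneceLoop (s : List Char) (e : Char) (acc : Bool) : Bool :=
  match s with
  | [] => acc
  | x :: xs => if x == e then true else perteneceLoop xs e false

def pertenece (s : List Char) (e : Char) : Bool := perteneceLoop s e false

-- Python returns inside the first outer iteration, so only lista[0]'s count matters;
-- on [] Python would return None, but A only calls this with len ≥ 3 (short-circuit).
def tiene_repetidos (lista : List Char) : Bool :=
  match lista with
  | [] => false
  | evaluar :: _ =>
    let repeticiones := lista.foldl (fun r elemento => if evaluar == elemento then r + 1 else r) 0
    if repeticiones > 1 then true else false

def tiene_vocales (palabra : String) : Bool :=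
  let vocales := ['a','e','i','o','u']
  let vocales_hay := palabra.toList.foldl
    (fun acc letra => if pertenece vocales letra then acc ++ [letra] else acc) []
  if vocales_hay.length ≥ 3 && (tiene_repetidos vocales_hay == false) then true else false

-- ===== PORT B =====
def tiene_vocales_alt (palabra : String) : Bool :=
  let vocales := palabra.toList.filter (fun c => "aeiou".toList.contains c)
  decide (vocales.length ≥ 3) && ((PySem.Set.ofList vocales).length == vocales.length)

-- ===== PRECONDITION & SPEC =====
def isVowel (c : Char) : Bool := c == 'a' || c == 'e' || c == 'i' || c == 'o' || c == 'u'

-- On words with ≥ 3 vowels whose first vowel occurs once but some later vowel repeats, A returns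
-- True (its duplicate helper returns inside the first iteration, so only the first vowel is
-- checked) while B returns False, the intended answer that no vowel may repeat.
def D_tiene_vocales (palabra : String) : Prop :=
  (palabra.toList.filter isVowel).length ≥ 3 ∧
  (palabra.toList.filter isVowel).count (palabra.toList.filter isVowel).headI = 1 ∧
  ¬ (palabra.toList.filter isVowel).Nodup
instance (palabra : String) : Decidable (D_tiene_vocales palabra) := by
  unfold D_tiene_vocales; infer_instance

def Spec_tiene_vocales (palabra : String) (out : Bool) : Prop :=
  ¬ D_tiene_vocales palabra → out = tiene_vocales_alt palabra
instance (palabra : String) (out : Bool) : Decidable (Spec_tiene_vocales palabra out) := by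
  unfold Spec_tiene_vocales; infer_instance

def pvDiffWitness_tiene_vocales : String := "aeei"
def pvDiffWitnessOut_tiene_vocales : Bool × Bool := (true, false)

-- ===== CLAIM (what is proved, stated in full; the proofs are below) =====
def Claim_unchanged_tiene_vocales : Prop :=
  ∀ (palabra : String), Dom_tiene_vocales palabra →
    Spec_tiene_vocales palabra (tiene_vocales palabra)
def Claim_changed_tiene_vocales : Prop :=
  Dom_tiene_vocales (pvDiffWitness_tiene_vocales) ∧
  D_tiene_vocales (pvDiffWitness_tiene_vocales) ∧
  tiene_vocales (pvDiffWitness_tiene_vocales) = pvDiffWitnessOut_tiene_vocales.1 ∧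
  tiene_vocales_alt (pvDiffWitness_tiene_vocales) = pvDiffWitnessOut_tiene_vocales.2 ∧
  pvDiffWitnessOut_tiene_vocales.1 ≠ pvDiffWitnessOut_tiene_vocales.2
def Claim_exact_tiene_vocales : Prop :=
  ∀ (palabra : String), Dom_tiene_vocales palabra → D_tiene_vocales palabra →
    tiene_vocales palabra ≠ tiene_vocales_alt palabra

-- ===== LEMMAS AND PROOFS =====

theorem pertenece_eq_isVowel (c : Char) : pertenece ['a','e','i','o','u'] c = isVowel c := by
  by_cases h1 : c = 'a'; · subst h1; decide
  by_cases h2 : c = 'e'; · subst h2; decide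
  by_cases h3 : c = 'i'; · subst h3; decide
  by_cases h4 : c = 'o'; · subst h4; decide
  by_cases h5 : c = 'u'; · subst h5; decide
  have a1 : ('a' == c) = false := by simp [Ne.symm h1]
  have a2 : ('e' == c) = false := by simp [Ne.symm h2]
  have a3 : ('i' == c) = false := by simp [Ne.symm h3]
  have a4 : ('o' == c) = false := by simp [Ne.symm h4]
  have a5 : ('u' == c) = false := by simp [Ne.symm h5]
  have b1 : (c == 'a') = false := by simp [h1]
  have b2 : (c == 'e') = false := by simp [h2]
  have b3 : (c == 'i') = false := by simp [h3]
  have b4 : (c == 'o') = false := by simp [h4]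
  have b5 : (c == 'u') = false := by simp [h5]
  simp [pertenece, perteneceLoop, isVowel, a1, a2, a3, a4, a5, b1, b2, b3, b4, b5]

theorem contains_eq_isVowel (c : Char) : "aeiou".toList.contains c = isVowel c := by
  by_cases h1 : c = 'a'; · subst h1; decide
  by_cases h2 : c = 'e'; · subst h2; decide
  by_cases h3 : c = 'i'; · subst h3; decide
  by_cases h4 : c = 'o'; · subst h4; decide
  by_cases h5 : c = 'u'; · subst h5; decide
  have hs : "aeiou".toList = ['a','e','i','o','u'] := rfl
  have b1 : (c == 'a') = false := by simp [h1]
  have b2 : (c == 'e') = false := by simp [h2]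
  have b3 : (c == 'i') = false := by simp [h3]
  have b4 : (c == 'o') = false := by simp [h4]
  have b5 : (c == 'u') = false := by simp [h5]
  simp [hs, List.contains_eq_mem, h1, h2, h3, h4, h5, isVowel, b1, b2, b3, b4, b5]

theorem repet_count (v : Char) (l : List Char) (n : Nat) :
    l.foldl (fun r elemento => if v == elemento then r + 1 else r) n = n + l.count v := by
  induction l generalizing n with
  | nil => simp
  | cons x xs ih =>
    simp only [List.foldl_cons, List.count_cons, ih]
    by_cases hx : v = x
    · subst hx; simp; omega
    · have h1 : (v == x) = false := by simp [hx]
      have h2 : (x == v) = false := by simp [Ne.symm hx]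
      simp [h1, h2]

theorem A_list (l : List Char) :
    l.foldl (fun acc letra => if pertenece ['a','e','i','o','u'] letra then acc ++ [letra] else acc)
      ([] : List Char) = l.filter isVowel := by
  have := PySem.List.foldl_append_if_eq_filter (l := l) (acc := ([] : List Char))
    (p := fun c => pertenece ['a','e','i','o','u'] c)
  rw [this]
  exact List.filter_congr (fun x _ => pertenece_eq_isVowel x)

theorem B_filter (l : List Char) :
    l.filter (fun c => "aeiou".toList.contains c) = l.filter isVowel :=
  List.filter_congr (fun x _ => contains_eq_isVowel x)

theorem foldl_add_length_le (l s : List Char) :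
    (l.foldl PySem.Set.add s).length ≤ s.length + l.length := by
  induction l generalizing s with
  | nil => simp
  | cons x xs ih =>
    rw [List.foldl_cons]
    simp only [List.length_cons]
    have hadd : (PySem.Set.add s x).length ≤ s.length + 1 := by
      unfold PySem.Set.add; split <;> simp
    have := ih (PySem.Set.add s x)
    omega

theorem foldl_add_length_eq_iff (l s : List Char) :
    (l.foldl PySem.Set.add s).length = s.length + l.length ↔
      (l.Nodup ∧ ∀ x ∈ l, x ∉ s) := by
  induction l generalizing s with
  | nil => simp
  | cons x xs ih =>
    rw [List.foldl_cons]
    simp only [List.length_cons]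
    by_cases hx : x ∈ s
    · have hc : PySem.Set.add s x = s := by
        unfold PySem.Set.add
        simp [List.contains_eq_mem, hx]
      rw [hc]
      constructor
      · intro h
        have := foldl_add_length_le xs s
        omega
      · rintro ⟨-, h⟩
        exact absurd hx (h x (by simp))
    · have hc : PySem.Set.add s x = s ++ [x] := by
        unfold PySem.Set.add
        simp [List.contains_eq_mem, hx]
      rw [hc]
      have hlen : (s ++ [x]).length = s.length + 1 := by simp
      constructor
      · intro h
        have h' : (xs.foldl PySem.Set.add (s ++ [x])).length = (s ++ [x]).length + xs.length := by
          rw [hlen]; omega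
        obtain ⟨hnd, hmem⟩ := (ih (s ++ [x])).mp h'
        refine ⟨List.nodup_cons.mpr ⟨fun hxm => ?_, hnd⟩, ?_⟩
        · exact (hmem x hxm) (by simp)
        · intro y hy
          rcases List.mem_cons.mp hy with hy | hy
          · exact hy ▸ hx
          · intro hys
            exact (hmem y hy) (by simp [hys])
      · rintro ⟨hnd, hmem⟩
        rw [List.nodup_cons] at hnd
        have h' : (xs.foldl PySem.Set.add (s ++ [x])).length = (s ++ [x]).length + xs.length := by
          refine (ih (s ++ [x])).mpr ⟨hnd.2, ?_⟩
          intro y hy hys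
          rcases List.mem_append.mp hys with h1 | h2
          · exact hmem y (by simp [hy]) h1
          · simp at h2
            exact hnd.1 (h2 ▸ hy)
        rw [h', hlen]; omega

theorem ofList_length_eq_iff (l : List Char) :
    ((PySem.Set.ofList l).length = l.length) ↔ l.Nodup := by
  have h : PySem.Set.ofList l = l.foldl PySem.Set.add [] := PySem.Set.ofList_eq_foldl l
  rw [h]
  constructor
  · intro he
    exact ((foldl_add_length_eq_iff l []).mp (by simpa using he)).1
  · intro hnd
    have := (foldl_add_length_eq_iff l []).mpr ⟨hnd, by simp⟩
    simpa using this

theorem B_val (palabra : String) :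
    tiene_vocales_alt palabra =
      (decide ((palabra.toList.filter isVowel).length ≥ 3) &&
       decide (palabra.toList.filter isVowel).Nodup) := by
  have h2 : ((PySem.Set.ofList (palabra.toList.filter isVowel)).length ==
      (palabra.toList.filter isVowel).length) = decide (palabra.toList.filter isVowel).Nodup := by
    rw [Bool.eq_iff_iff]
    simp [ofList_length_eq_iff]
  show (decide ((palabra.toList.filter (fun c => "aeiou".toList.contains c)).length ≥ 3) &&
      ((PySem.Set.ofList (palabra.toList.filter (fun c => "aeiou".toList.contains c))).length ==
        (palabra.toList.filter (fun c => "aeiou".toList.contains c)).length)) = _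
  rw [B_filter, h2]

theorem A_val (palabra : String) :
    tiene_vocales palabra =
      match palabra.toList.filter isVowel with
      | [] => false
      | h :: t => decide (t.length + 1 ≥ 3) && decide (t.count h = 0) := by
  unfold tiene_vocales
  simp only [A_list]
  cases hvs : palabra.toList.filter isVowel with
  | nil => simp [tiene_repetidos]
  | cons h t =>
    simp only [tiene_repetidos, repet_count]
    have hcount : (h :: t).count h = 1 + t.count h := by simp; omega
    simp only [hcount, List.length_cons]
    by_cases hlen : t.length + 1 ≥ 3
    · by_cases hdup : t.count h = 0
      · simp [hdup, hlen]
      · have : 1 + t.count h > 1 := by omega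
        simp [this, hdup]
    · have h1 : ¬ (3 ≤ t.length + 1) := by omega
      simp [h1]

-- ===== VERDICT (by name: the statements are the Claim_ definitions above) =====
theorem tiene_vocales_spec : Claim_unchanged_tiene_vocales := by
  intro palabra _ hnd
  unfold D_tiene_vocales at hnd
  rw [A_val, B_val]
  cases hvs : palabra.toList.filter isVowel with
  | nil => simp
  | cons h t =>
    rw [hvs] at hnd
    simp only [List.headI, List.count_cons_self, List.length_cons] at hnd
    simp only
    by_cases hlen : t.length + 1 ≥ 3
    · by_cases hcz : t.count h = 0
      · have hdup : (h :: t).Nodup := by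
          by_contra hcon
          exact hnd ⟨hlen, by omega, hcon⟩
        simp [hlen, hcz, hdup, List.length_cons]
      · have hin : h ∈ t := by
          by_contra hni
          exact hcz (List.count_eq_zero.mpr hni)
        have hnodup : ¬ (h :: t).Nodup := by
          rw [List.nodup_cons]; tauto
        simp [hcz, hnodup, List.length_cons]
    · have h1 : ¬ (3 ≤ t.length + 1) := by omega
      simp [h1, List.length_cons]

theorem tiene_vocales_changed : Claim_changed_tiene_vocales := by
  unfold Claim_changed_tiene_vocales; decide

theorem tiene_vocales_tight : Claim_exact_tiene_vocales := by
  intro palabra _ hd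
  unfold D_tiene_vocales at hd
  rw [A_val, B_val]
  cases hvs : palabra.toList.filter isVowel with
  | nil => rw [hvs] at hd; simp at hd
  | cons h t =>
    rw [hvs] at hd
    simp only [List.headI, List.count_cons_self, List.length_cons] at hd
    obtain ⟨hlen, hcz, hnd⟩ := hd
    have hcz' : t.count h = 0 := by omega
    simp [hlen, hcz', hnd, List.length_cons]
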